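-- pv_equiv track=rewrite | github.com/ZerotakerZX/Python | TestFormulas/operators.py | task631
-- ===== SOURCE A (Python) =====
-- def task631(number):
--     string_number = str(number)  # переводим число в строку
--     target = max(string_number)  # ищем наибольшую цифру
--     times = 0  # тут будет считаться сколько раз мы нашли целевую цифру
--     for i in string_number:
--         if i == target:  # сканируем стринг на предмет целоевого числа - 8-ки
--             times = times + 1  # и записываем каждое совпадение в переменную
--     return times  # после чего возвращем что получилось
-- ===== SOURCE B (Python) =====
-- def task631(number):
--     hist = {}
--     for ch in str(number):
--         hist[ch] = hist.get(ch, 0) + 1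
--     return hist[max(hist)]
-- ===== Notes on version B (the rewrite author's own statement) =====
-- stated objective: alternative
-- what changed: Replaces A's two passes over the digit string (find max char, then scan-and-count it) with one pass that builds a character frequency table, then returns the entry stored under the maximum key.
import Mathlib
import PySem

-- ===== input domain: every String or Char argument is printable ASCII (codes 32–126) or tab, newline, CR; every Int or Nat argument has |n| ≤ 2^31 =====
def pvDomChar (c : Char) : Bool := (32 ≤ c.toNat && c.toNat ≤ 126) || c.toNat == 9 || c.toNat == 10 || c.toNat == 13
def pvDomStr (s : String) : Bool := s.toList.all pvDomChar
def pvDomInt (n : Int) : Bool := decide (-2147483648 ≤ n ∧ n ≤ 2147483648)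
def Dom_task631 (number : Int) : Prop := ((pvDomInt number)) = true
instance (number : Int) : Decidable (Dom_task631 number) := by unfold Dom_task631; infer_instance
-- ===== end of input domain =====

-- B builds a character frequency table in one pass and looks up the maximum key,
-- instead of A's find-max-then-rescan-and-count two-loop strategy (objective: alternative).

-- ===== PORT A =====
def task631 (number : Int) : Int :=
  let s := (PySem.Int.toStr number).toList
  match PySem.List.max? s (fun c => c) with
  | none => 0    -- unreachable: str(number) is never empty, so Python's max never raises
  | some target => s.foldl (fun times i => if i == target then times + 1 else times) 0

-- ===== PORT B =====
def task631_alt (number : Int) : Int :=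
  let s := (PySem.Int.toStr number).toList
  let hist := s.foldl (fun d ch => d.insert ch (d.getD ch 0 + 1)) PySem.Dict.empty
  match PySem.List.max? hist.keys (fun c => c) with
  | none => 0    -- unreachable: the histogram of a nonempty string is nonempty
  | some m => hist.getD m 0

-- ===== PRECONDITION & SPEC =====
def Spec_task631 (number : Int) (out : Int) : Prop := out = task631_alt number
instance (number : Int) (out : Int) : Decidable (Spec_task631 number out) := by unfold Spec_task631; infer_instance

-- ===== CLAIM (what is proved, stated in full; the proofs are below) =====
def Claim_equal_task631 : Prop := ∀ (number : Int), Dom_task631 number → Spec_task631 number (task631 number)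

-- ===== LEMMAS AND PROOFS =====

-- ===== VERDICT (by name: the statement is the Claim_ definition above) =====
theorem task631_spec : Claim_equal_task631 := by
  intro n _
  unfold Spec_task631 task631 task631_alt
  simp only []
  set s := (PySem.Int.toStr n).toList with hs
  rw [PySem.Dict.foldl_insert_getD_add_one_eq_counter]
  rw [PySem.Dict.keys_counter]
  cases h1 : PySem.List.max? s (fun c => c) with
  | none =>
    have hsnil : s = [] := (PySem.List.max?_eq_none_iff _ _).1 h1
    simp [hsnil, PySem.List.max?, PySem.Set.ofList]
  | some t =>
    cases h2 : PySem.List.max? (PySem.Set.ofList s) (fun c => c) with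
    | none =>
      have : (PySem.Set.ofList s : List Char) = [] := (PySem.List.max?_eq_none_iff _ _).1 h2
      have ht : t ∈ s := PySem.List.max?_mem h1
      have : t ∈ (PySem.Set.ofList s : List Char) := (PySem.Set.mem_ofList _ _).2 ht
      simp_all
    | some m =>
      have ht : t ∈ s := PySem.List.max?_mem h1
      have hm : m ∈ (PySem.Set.ofList s : List Char) := PySem.List.max?_mem h2
      have hm' : m ∈ s := (PySem.Set.mem_ofList _ _).1 hm
      have h1' := PySem.List.max?_isMax h1 m hm'
      have h2' := PySem.List.max?_isMax h2 t ((PySem.Set.mem_ofList _ _).2 ht)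
      have htm : t = m := le_antisymm h2' h1'
      subst htm
      show List.foldl (fun times i => if i == t then times + 1 else times) 0 s =
        (PySem.Dict.counter s).getD t 0
      rw [PySem.Dict.getD_counter, PySem.List.foldl_beq_add_one]
      simp
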